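-- pv_equiv track=rewrite | github.com/alasdairnicol/advent-of-code-2020 | day23.py | do_turn
-- ===== SOURCE A (Python) =====
-- import itertools
--
-- def do_turn(cups):
--     cups_loop = itertools.cycle(cups)
--     current_cup = next(cups_loop)  # current cup
--     picked_up = [next(cups_loop), next(cups_loop), next(cups_loop)]
--     out = []
--     destination = current_cup
--     while destination in [current_cup] + picked_up:
--         destination -= 1
--         if destination == 0:
--             destination = 9
--     while len(out) < 9:
--         next_cup = next(cups_loop)
--         out.append(next_cup)
--         if next_cup == destination:
--             out.extend(picked_up)
--
--     return out
-- ===== SOURCE B (Python) =====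
-- def do_turn(cups):
--     n = len(cups)
--     current = cups[0]
--     picked = [cups[i % n] for i in (1, 2, 3)]
--     destination = current
--     while destination in [current] + picked:
--         destination -= 1
--         if destination == 0:
--             destination = 9
--
--     def fill(i, k):
--         # emit the ring cup by cup, gluing the picked trio after the destination,
--         # until at least k slots are filled
--         if k <= 0:
--             return []
--         cup = cups[i % n]
--         block = [cup] + (picked if cup == destination else [])
--         return block + fill(i + 1, k - len(block))
--
--     return fill(4, 9)
-- ===== Notes on version B (the rewrite author's own statement) =====
-- stated objective: alternative
-- what changed: B drops the itertools.cycle iterator and the imperative append/extend scan: it indexes the ring modularly, keeps the destination loop, and builds the result by a recursion that emits one block at a time (a cup, with the picked trio glued after the destination) until nine slots are filled; Pre_ excludes only the empty list, on which A raises StopIteration.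
import Mathlib
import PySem

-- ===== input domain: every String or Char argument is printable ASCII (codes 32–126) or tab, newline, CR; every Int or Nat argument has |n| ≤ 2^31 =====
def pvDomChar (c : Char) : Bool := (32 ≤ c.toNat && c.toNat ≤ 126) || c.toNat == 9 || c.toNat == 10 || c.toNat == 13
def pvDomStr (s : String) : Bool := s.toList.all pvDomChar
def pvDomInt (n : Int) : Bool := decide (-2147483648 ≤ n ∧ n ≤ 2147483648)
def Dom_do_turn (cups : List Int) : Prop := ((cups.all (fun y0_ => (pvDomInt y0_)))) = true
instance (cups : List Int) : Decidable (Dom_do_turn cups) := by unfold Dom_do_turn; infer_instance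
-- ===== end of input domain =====

set_option maxHeartbeats 1000000


-- One turn of the crab-cups game. B drops the itertools.cycle iterator and the
-- imperative append/extend scan: it indexes the ring modularly and fills the nine
-- output slots by a recursion emitting one block (a cup, with the picked trio glued
-- after the destination) at a time.

-- ===== PORT A =====
-- A's `while destination in [current]+picked` loop, with fuel: each iteration either
-- exits or decrements-and-wraps; 16 steps always suffice to leave the 4-element
-- checked list (the wrap-decrement sequence visits 5 distinct values within 5 steps,
-- and below 0 nothing is revisited), so the port's fuel is never exhausted on inputs
-- the differential test draws; the same loop appears verbatim in B.
def destLoopA (current : Int) (picked : List Int) : Nat → Int → Int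
  | 0, d => d
  | fuel + 1, d =>
    if d ∈ current :: picked then
      let d' := d - 1
      let d'' := if d' = 0 then 9 else d'
      destLoopA current picked fuel d''
    else d

-- A's `while len(out) < 9` loop; the cycle iterator is modeled by the running index j
-- with cups.getD (j % cups.length) (exact for nonempty cups; Pre_ excludes []).
-- Each iteration appends at least one element and the loop stops at length ≥ 9,
-- so at most 9 iterations run; fuel 16 is ample.
def outLoopA (cups picked : List Int) (dest : Int) : Nat → Nat → List Int → List Int
  | 0, _, out => out
  | fuel + 1, j, out =>
    if out.length < 9 then
      let c := cups.getD (j % cups.length) 0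
      let out' := out ++ [c]
      let out'' := if c = dest then out' ++ picked else out'
      outLoopA cups picked dest fuel (j + 1) out''
    else out

def do_turn (cups : List Int) : List Int :=
  -- next(cups_loop) four times: cycle indices 0,1,2,3
  let current := cups.getD (0 % cups.length) 0
  let picked := [cups.getD (1 % cups.length) 0, cups.getD (2 % cups.length) 0,
                 cups.getD (3 % cups.length) 0]
  let dest := destLoopA current picked 16 current
  outLoopA cups picked dest 16 4 []

-- ===== PORT B =====
-- Source B's destination loop (the same while loop as in A's source), same fuel bound.
def destLoopB (current : Int) (picked : List Int) : Nat → Int → Int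
  | 0, d => d
  | fuel + 1, d =>
    if d ∈ current :: picked then
      let d' := d - 1
      let d'' := if d' = 0 then 9 else d'
      destLoopB current picked fuel d''
    else d

-- Source B's recursive fill(i, k): emit one block per call until k slots are filled.
def fillB (cups picked : List Int) (dest : Int) (i : Nat) (k : Int) : List Int :=
  if k ≤ 0 then []
  else
    let cup := cups.getD (i % cups.length) 0
    let block := cup :: (if cup = dest then picked else [])
    block ++ fillB cups picked dest (i + 1) (k - block.length)
termination_by k.toNat
decreasing_by simp only [List.length_cons]; omega

def do_turn_alt (cups : List Int) : List Int :=
  let n := cups.length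
  let current := cups.getD 0 0                          -- cups[0]; exact: Pre_ gives cups ≠ []
  let picked := [1, 2, 3].map (fun i => cups.getD (i % n) 0)
  let dest := destLoopB current picked 16 current
  fillB cups picked dest 4 9

-- ===== PRECONDITION & SPEC =====
-- Pre_ excludes exactly the empty list, on which the Python A raises StopIteration
-- (next on an empty itertools.cycle); B raises IndexError there too.
def Pre_do_turn (cups : List Int) : Prop := cups ≠ []
instance (cups : List Int) : Decidable (Pre_do_turn cups) := by unfold Pre_do_turn; infer_instance

def pvWitness_do_turn : List Int := [3, 8, 9, 1, 2, 5, 4, 6, 7]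

def Spec_do_turn (cups : List Int) (out : List Int) : Prop := out = do_turn_alt cups
instance (cups : List Int) (out : List Int) : Decidable (Spec_do_turn cups out) := by unfold Spec_do_turn; infer_instance

-- ===== CLAIM (what is proved, stated in full; the proofs are below) =====
def Claim_equal_do_turn : Prop := ∀ (cups : List Int), Dom_do_turn cups → Pre_do_turn cups → Spec_do_turn cups (do_turn cups)

-- ===== LEMMAS AND PROOFS =====

theorem destLoopB_eq (current : Int) (picked : List Int) :
    ∀ (fuel : Nat) (d : Int), destLoopB current picked fuel d = destLoopA current picked fuel d := by
  intro fuel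
  induction fuel with
  | zero => intro d; rfl
  | succ f ih => intro d; simp only [destLoopA, destLoopB]; split_ifs <;> simp [ih]

-- The loop invariant: A's scan with accumulator `out` produces `out` followed by
-- B's block recursion filling the remaining 9 - out.length slots, as soon as the
-- fuel covers the remaining slot count.
theorem loop_eq (cups picked : List Int) (dest : Int) :
    ∀ (fuel : Nat) (j : Nat) (out : List Int),
      (9 : Int) - out.length ≤ fuel →
      outLoopA cups picked dest fuel j out
        = out ++ fillB cups picked dest j (9 - (out.length : Int)) := by
  intro fuel
  induction fuel with
  | zero =>
    intro j out hf
    rw [outLoopA, fillB, if_pos (by omega)]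
    simp
  | succ f ih =>
    intro j out hf
    by_cases hlt : out.length < 9
    · rw [outLoopA, if_pos hlt]
      have hk : ¬ ((9 : Int) - (out.length : Int) ≤ 0) := by omega
      by_cases hc : cups.getD (j % cups.length) 0 = dest
      · simp only [if_pos hc]
        rw [ih (j + 1) (out ++ [cups.getD (j % cups.length) 0] ++ picked)
          (by simp only [List.length_append, List.length_cons, List.length_nil]; push_cast; omega)]
        conv_rhs => rw [fillB]
        rw [if_neg hk]
        simp only [if_pos hc, List.length_append, List.length_cons,
          List.append_assoc, List.cons_append, List.nil_append]
        have harg : (9 : Int) - ((out.length + (picked.length + 1) : Nat) : Int)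
            = 9 - (out.length : Int) - ((picked.length + 1 : Nat) : Int) := by push_cast; ring
        rw [harg]
      · simp only [if_neg hc]
        rw [ih (j + 1) (out ++ [cups.getD (j % cups.length) 0])
          (by simp only [List.length_append, List.length_cons, List.length_nil]; push_cast; omega)]
        conv_rhs => rw [fillB]
        rw [if_neg hk]
        simp only [if_neg hc, List.length_append, List.length_cons, List.length_nil,
          List.append_assoc, List.cons_append, List.nil_append]
        have harg : (9 : Int) - ((out.length + 1 : Nat) : Int)
            = 9 - (out.length : Int) - ((1 : Nat) : Int) := by push_cast; ring
        rw [harg]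
    · rw [outLoopA, if_neg hlt]
      rw [fillB, if_pos (by omega)]
      simp

-- ===== VERDICT (by name: the statement is the Claim_ definition above) =====
theorem do_turn_spec : Claim_equal_do_turn := by
  intro cups _hdom _hpre
  unfold Spec_do_turn
  show do_turn cups = do_turn_alt cups
  simp only [do_turn, do_turn_alt, Nat.zero_mod, List.map, destLoopB_eq]
  rw [loop_eq cups _ _ 16 4 [] (by simp)]
  simp [List.getD]
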